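-- pv_equiv track=rewrite | github.com/xcad2k/CodeWars-Python | SolutionsByTobi/challenges_5kyu/mixbonacci.py | mixbonacci
-- ===== SOURCE A (Python) =====
-- def mixbonacci(pattern, length):
--     res = []
--     if len(pattern) == 0:
--         return res
--     fib = fibonacci()
--     pad = padovan()
--     pel = pell()
--     jac = jacobsthal()
--     tri = tribonacci()
--     tet = tetranacci()
--     for i in range(length):
--         current_pattern = pattern[i % len(pattern)]
--         if current_pattern == 'fib':
--             res.append(next(fib))
--         elif current_pattern == 'pad':
--             res.append(next(pad))
--         elif current_pattern == 'pel':
--             res.append(next(pel))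
--         elif current_pattern == 'jac':
--             res.append(next(jac))
--         elif current_pattern == 'tri':
--             res.append(next(tri))
--         elif current_pattern == 'tet':
--             res.append(next(tet))
--     return res
--
-- def fibonacci():
--     a, b = 0, 1
--     while True:
--         yield a
--         a, b = b, a + b
--
-- def tribonacci():
--     a, b, c = 0, 0, 1
--     yield a
--     yield b
--     while True:
--         yield c
--         a, b, c = b, c, a + b + c
--
-- def tetranacci():
--     a, b, c, d = 0, 0, 0, 1
--     yield a
--     yield b
--     yield c
--     while True:
--         yield d
--         a, b, c, d = b, c, d, a + b + c + d
--
-- def padovan():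
--     a, b, c = 1, 0, 0
--     yield a
--     yield b
--     while True:
--         yield c
--         a, b, c = b, c, a + b
--
-- def pell():
--     a, b = 0, 1
--     yield a
--     while True:
--         yield b
--         a, b = b, 2 * b + a
--
-- def jacobsthal():
--     a, b = 0, 1
--     yield a
--     while True:
--         yield b
--         a, b = b, 2 * a + b
-- ===== SOURCE B (Python) =====
-- def _table(init, step, k):
--     l = init[:k]
--     while len(l) < k:
--         l.append(step(l))
--     return l
--
-- def mixbonacci(pattern, length):
--     if not pattern:
--         return []
--     m = len(pattern)
--     cf = cp = cl = cj = ct = cq = 0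
--     for i in range(length):
--         name = pattern[i % m]
--         if name == 'fib': cf += 1
--         elif name == 'pad': cp += 1
--         elif name == 'pel': cl += 1
--         elif name == 'jac': cj += 1
--         elif name == 'tri': ct += 1
--         elif name == 'tet': cq += 1
--     tf = _table([0, 1], lambda l: l[-1] + l[-2], cf)
--     tp = _table([1, 0, 0], lambda l: l[-2] + l[-3], cp)
--     tl = _table([0, 1], lambda l: 2 * l[-1] + l[-2], cl)
--     tj = _table([0, 1], lambda l: l[-1] + 2 * l[-2], cj)
--     tt = _table([0, 0, 1], lambda l: l[-1] + l[-2] + l[-3], ct)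
--     tq = _table([0, 0, 0, 1], lambda l: l[-1] + l[-2] + l[-3] + l[-4], cq)
--     res = []
--     nf = np = nl = nj = nt = nq = 0
--     for i in range(length):
--         name = pattern[i % m]
--         if name == 'fib': res.append(tf[nf]); nf += 1
--         elif name == 'pad': res.append(tp[np]); np += 1
--         elif name == 'pel': res.append(tl[nl]); nl += 1
--         elif name == 'jac': res.append(tj[nj]); nj += 1
--         elif name == 'tri': res.append(tt[nt]); nt += 1
--         elif name == 'tet': res.append(tq[nq]); nq += 1
--     return res
-- ===== Notes on version B (the rewrite author's own statement) =====
-- stated objective: alternative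
-- what changed: A advances six interleaved lazy generators during a single pass; B first counts how many terms of each sequence the pattern demands, builds each sequence as a list via its recurrence on the list's own tail entries, and then assembles the result in a second pass with per-sequence cursors.
import Mathlib
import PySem

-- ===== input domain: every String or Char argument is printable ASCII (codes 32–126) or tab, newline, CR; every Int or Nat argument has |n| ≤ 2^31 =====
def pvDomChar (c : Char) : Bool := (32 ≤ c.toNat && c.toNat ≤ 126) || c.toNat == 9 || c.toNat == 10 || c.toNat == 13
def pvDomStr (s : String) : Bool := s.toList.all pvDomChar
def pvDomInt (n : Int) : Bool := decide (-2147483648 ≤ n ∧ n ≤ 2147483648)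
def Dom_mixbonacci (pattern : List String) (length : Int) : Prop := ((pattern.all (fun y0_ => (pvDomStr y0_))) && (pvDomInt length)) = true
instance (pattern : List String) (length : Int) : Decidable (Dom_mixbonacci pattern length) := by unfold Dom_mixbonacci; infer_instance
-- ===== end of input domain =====

-- B replaces A's one pass of six interleaved generators by a counting pass, six recurrence tables built
-- by list self-reference, and an assembly pass with cursors (objective: alternative decomposition).

-- ===== PORT A =====
-- pattern[i % len(pattern)]; index is always in range (0 ≤ i % m < m), so .getD "" never fires
def pname (pattern : List String) (i : Int) : String :=
  (PySem.List.pyGet? pattern (PySem.Int.mod i (pattern.length : Int))).getD ""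

-- the six Python generators, as (yield value, next state) machines; Nat component = phase (yields before the loop)
def fibNext (s : Int × Int) : Int × (Int × Int) := (s.1, (s.2, s.1 + s.2))

def padNext : Nat × Int × Int × Int → Int × (Nat × Int × Int × Int)
  | (0, a, b, c) => (a, (1, a, b, c))
  | (1, a, b, c) => (b, (2, a, b, c))
  | (_+2, a, b, c) => (c, (2, b, c, a + b))

def pelNext : Nat × Int × Int → Int × (Nat × Int × Int)
  | (0, a, b) => (a, (1, a, b))
  | (_+1, a, b) => (b, (1, b, 2 * b + a))

def jacNext : Nat × Int × Int → Int × (Nat × Int × Int)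
  | (0, a, b) => (a, (1, a, b))
  | (_+1, a, b) => (b, (1, b, 2 * a + b))

def triNext : Nat × Int × Int × Int → Int × (Nat × Int × Int × Int)
  | (0, a, b, c) => (a, (1, a, b, c))
  | (1, a, b, c) => (b, (2, a, b, c))
  | (_+2, a, b, c) => (c, (2, b, c, a + b + c))

def tetNext : Nat × Int × Int × Int × Int → Int × (Nat × Int × Int × Int × Int)
  | (0, a, b, c, d) => (a, (1, a, b, c, d))
  | (1, a, b, c, d) => (b, (2, a, b, c, d))
  | (2, a, b, c, d) => (c, (3, a, b, c, d))
  | (_+3, a, b, c, d) => (d, (3, b, c, d, a + b + c + d))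

def MixStA : Type :=
  List Int × (Int × Int) × (Nat × Int × Int × Int) × (Nat × Int × Int) × (Nat × Int × Int)
    × (Nat × Int × Int × Int) × (Nat × Int × Int × Int × Int)

-- the body of A's for-loop
def mixStepA (pattern : List String) (st : MixStA) (i : Int) : MixStA :=
  match st with
  | (res, fib, pad, pel, jac, tri, tet) =>
    let cur := pname pattern i
    if cur == "fib" then (res ++ [(fibNext fib).1], (fibNext fib).2, pad, pel, jac, tri, tet)
    else if cur == "pad" then (res ++ [(padNext pad).1], fib, (padNext pad).2, pel, jac, tri, tet)
    else if cur == "pel" then (res ++ [(pelNext pel).1], fib, pad, (pelNext pel).2, jac, tri, tet)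
    else if cur == "jac" then (res ++ [(jacNext jac).1], fib, pad, pel, (jacNext jac).2, tri, tet)
    else if cur == "tri" then (res ++ [(triNext tri).1], fib, pad, pel, jac, (triNext tri).2, tet)
    else if cur == "tet" then (res ++ [(tetNext tet).1], fib, pad, pel, jac, tri, (tetNext tet).2)
    else (res, fib, pad, pel, jac, tri, tet)

def mixbonacci (pattern : List String) (length : Int) : List Int :=
  if pattern.length == 0 then []
  else
    ((PySem.List.pyRange 0 length 1).foldl (mixStepA pattern)
      ([], (0, 1), (0, 1, 0, 0), (0, 0, 1), (0, 0, 1), (0, 0, 0, 1), (0, 0, 0, 0, 1))).1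

-- ===== PORT B =====
def tableGo (step : List Int → Int) (l : List Int) : Nat → List Int
  | 0 => l
  | n+1 => tableGo step (l ++ [step l]) n

-- _table(init, step, k): the while-loop runs exactly k - len(init[:k]) times
def table (init : List Int) (step : List Int → Int) (k : Nat) : List Int :=
  tableGo step (init.take k) (k - (init.take k).length)

-- the lambdas of Source B; l[-1] … are always in range at every call, so .getD 0 never fires
def stepFib (l : List Int) : Int := (PySem.List.pyGet? l (-1)).getD 0 + (PySem.List.pyGet? l (-2)).getD 0
def stepPad (l : List Int) : Int := (PySem.List.pyGet? l (-2)).getD 0 + (PySem.List.pyGet? l (-3)).getD 0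
def stepPel (l : List Int) : Int := 2 * (PySem.List.pyGet? l (-1)).getD 0 + (PySem.List.pyGet? l (-2)).getD 0
def stepJac (l : List Int) : Int := (PySem.List.pyGet? l (-1)).getD 0 + 2 * (PySem.List.pyGet? l (-2)).getD 0
def stepTri (l : List Int) : Int :=
  (PySem.List.pyGet? l (-1)).getD 0 + (PySem.List.pyGet? l (-2)).getD 0 + (PySem.List.pyGet? l (-3)).getD 0
def stepTet (l : List Int) : Int :=
  (PySem.List.pyGet? l (-1)).getD 0 + (PySem.List.pyGet? l (-2)).getD 0
    + (PySem.List.pyGet? l (-3)).getD 0 + (PySem.List.pyGet? l (-4)).getD 0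

def CntSt : Type := Nat × Nat × Nat × Nat × Nat × Nat

-- the body of B's counting loop
def cntStep (pattern : List String) (c : CntSt) (i : Int) : CntSt :=
  match c with
  | (cf, cp, cl, cj, ct, cq) =>
    let cur := pname pattern i
    if cur == "fib" then (cf + 1, cp, cl, cj, ct, cq)
    else if cur == "pad" then (cf, cp + 1, cl, cj, ct, cq)
    else if cur == "pel" then (cf, cp, cl + 1, cj, ct, cq)
    else if cur == "jac" then (cf, cp, cl, cj + 1, ct, cq)
    else if cur == "tri" then (cf, cp, cl, cj, ct + 1, cq)
    else if cur == "tet" then (cf, cp, cl, cj, ct, cq + 1)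
    else (cf, cp, cl, cj, ct, cq)

def MixStB : Type := List Int × Nat × Nat × Nat × Nat × Nat × Nat

-- the body of B's assembly loop; tX[nX] is always in range, so .getD 0 never fires
def mixStepB (pattern : List String) (tf tp tl tj tt tq : List Int) (st : MixStB) (i : Int) : MixStB :=
  match st with
  | (res, nf, np, nl, nj, nt, nq) =>
    let cur := pname pattern i
    if cur == "fib" then (res ++ [tf.getD nf 0], nf + 1, np, nl, nj, nt, nq)
    else if cur == "pad" then (res ++ [tp.getD np 0], nf, np + 1, nl, nj, nt, nq)
    else if cur == "pel" then (res ++ [tl.getD nl 0], nf, np, nl + 1, nj, nt, nq)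
    else if cur == "jac" then (res ++ [tj.getD nj 0], nf, np, nl, nj + 1, nt, nq)
    else if cur == "tri" then (res ++ [tt.getD nt 0], nf, np, nl, nj, nt + 1, nq)
    else if cur == "tet" then (res ++ [tq.getD nq 0], nf, np, nl, nj, nt, nq + 1)
    else (res, nf, np, nl, nj, nt, nq)

def mixbonacci_alt (pattern : List String) (length : Int) : List Int :=
  if pattern.length == 0 then []
  else
    match (PySem.List.pyRange 0 length 1).foldl (cntStep pattern) (0, 0, 0, 0, 0, 0) with
    | (cf, cp, cl, cj, ct, cq) =>
      let tf := table [0, 1] stepFib cf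
      let tp := table [1, 0, 0] stepPad cp
      let tl := table [0, 1] stepPel cl
      let tj := table [0, 1] stepJac cj
      let tt := table [0, 0, 1] stepTri ct
      let tq := table [0, 0, 0, 1] stepTet cq
      ((PySem.List.pyRange 0 length 1).foldl (mixStepB pattern tf tp tl tj tt tq)
        ([], 0, 0, 0, 0, 0, 0)).1

-- ===== PRECONDITION & SPEC =====
def Spec_mixbonacci (pattern : List String) (length : Int) (out : List Int) : Prop := out = mixbonacci_alt pattern length
instance (pattern : List String) (length : Int) (out : List Int) : Decidable (Spec_mixbonacci pattern length out) := by unfold Spec_mixbonacci; infer_instance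

-- ===== CLAIM (what is proved, stated in full; the proofs are below) =====
def Claim_equal_mixbonacci : Prop := ∀ (pattern : List String) (length : Int), Dom_mixbonacci pattern length → Spec_mixbonacci pattern length (mixbonacci pattern length)

-- ===== LEMMAS AND PROOFS =====

-- canonical term functions of the six sequences
def fibT : Nat → Int
  | 0 => 0
  | 1 => 1
  | n+2 => fibT n + fibT (n+1)

def padT : Nat → Int
  | 0 => 1
  | 1 => 0
  | 2 => 0
  | n+3 => padT n + padT (n+1)

def pelT : Nat → Int
  | 0 => 0
  | 1 => 1
  | n+2 => 2 * pelT (n+1) + pelT n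

def jacT : Nat → Int
  | 0 => 0
  | 1 => 1
  | n+2 => 2 * jacT n + jacT (n+1)

def triT : Nat → Int
  | 0 => 0
  | 1 => 0
  | 2 => 1
  | n+3 => triT n + triT (n+1) + triT (n+2)

def tetT : Nat → Int
  | 0 => 0
  | 1 => 0
  | 2 => 0
  | 3 => 1
  | n+4 => tetT n + tetT (n+1) + tetT (n+2) + tetT (n+3)

-- the common meaning of both loops: the n-th recognized occurrence of a name contributes term n of its sequence
def canon (pattern : List String) : List Int → CntSt → List Int
  | [], _ => []
  | i :: rest, (nf, np, nl, nj, nt, nq) =>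
    let cur := pname pattern i
    if cur == "fib" then fibT nf :: canon pattern rest (nf + 1, np, nl, nj, nt, nq)
    else if cur == "pad" then padT np :: canon pattern rest (nf, np + 1, nl, nj, nt, nq)
    else if cur == "pel" then pelT nl :: canon pattern rest (nf, np, nl + 1, nj, nt, nq)
    else if cur == "jac" then jacT nj :: canon pattern rest (nf, np, nl, nj + 1, nt, nq)
    else if cur == "tri" then triT nt :: canon pattern rest (nf, np, nl, nj, nt + 1, nq)
    else if cur == "tet" then tetT nq :: canon pattern rest (nf, np, nl, nj, nt, nq + 1)
    else canon pattern rest (nf, np, nl, nj, nt, nq)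

def occ (pattern : List String) (s : String) (L : List Int) : Nat :=
  L.countP (fun i => pname pattern i == s)

-- generator state after n next() calls
def adv {σ : Type} (next : σ → Int × σ) (s0 : σ) (n : Nat) : σ := (fun s => (next s).2)^[n] s0


theorem fib_adv (n : Nat) : adv fibNext (0, 1) n = (fibT n, fibT (n+1)) := by
  induction n with
  | zero => rfl
  | succ n ih =>
    rw [adv, Function.iterate_succ_apply', ← adv, ih]
    show (fibT (n+1), fibT n + fibT (n+1)) = _
    rw [show fibT (n+2) = fibT n + fibT (n+1) from rfl]

theorem pad_adv (n : Nat) : adv padNext (0, 1, 0, 0) (n+2) = (2, padT n, padT (n+1), padT (n+2)) := by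
  induction n with
  | zero => rfl
  | succ n ih =>
    rw [show n+1+2 = (n+2)+1 from rfl, adv, Function.iterate_succ_apply', ← adv, ih]
    show (2, padT (n+1), padT (n+2), padT n + padT (n+1)) = _
    rw [show padT (n+3) = padT n + padT (n+1) from rfl]

theorem pad_val (n : Nat) : (padNext (adv padNext (0, 1, 0, 0) n)).1 = padT n := by
  match n with
  | 0 => rfl
  | 1 => rfl
  | n+2 => rw [pad_adv]; rfl

theorem adv_succ {σ : Type} (next : σ → Int × σ) (s0 : σ) (n : Nat) :
    adv next s0 (n+1) = (next (adv next s0 n)).2 := by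
  rw [adv, Function.iterate_succ_apply']; rfl

theorem fib_val (n : Nat) : (fibNext (adv fibNext (0, 1) n)).1 = fibT n := by
  rw [fib_adv]; rfl

theorem pel_adv (n : Nat) : adv pelNext (0, 0, 1) (n+1) = (1, pelT n, pelT (n+1)) := by
  induction n with
  | zero => rfl
  | succ n ih =>
    rw [adv_succ, ih]
    show (1, pelT (n+1), 2 * pelT (n+1) + pelT n) = _
    rw [show pelT (n+2) = 2 * pelT (n+1) + pelT n from rfl]

theorem pel_val (n : Nat) : (pelNext (adv pelNext (0, 0, 1) n)).1 = pelT n := by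
  match n with
  | 0 => rfl
  | n+1 => rw [pel_adv]; rfl

theorem jac_adv (n : Nat) : adv jacNext (0, 0, 1) (n+1) = (1, jacT n, jacT (n+1)) := by
  induction n with
  | zero => rfl
  | succ n ih =>
    rw [adv_succ, ih]
    show (1, jacT (n+1), 2 * jacT n + jacT (n+1)) = _
    rw [show jacT (n+2) = 2 * jacT n + jacT (n+1) from rfl]

theorem jac_val (n : Nat) : (jacNext (adv jacNext (0, 0, 1) n)).1 = jacT n := by
  match n with
  | 0 => rfl
  | n+1 => rw [jac_adv]; rfl

theorem tri_adv (n : Nat) : adv triNext (0, 0, 0, 1) (n+2) = (2, triT n, triT (n+1), triT (n+2)) := by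
  induction n with
  | zero => rfl
  | succ n ih =>
    rw [show n+1+2 = (n+2)+1 from rfl, adv_succ, ih]
    show (2, triT (n+1), triT (n+2), triT n + triT (n+1) + triT (n+2)) = _
    rw [show triT (n+3) = triT n + triT (n+1) + triT (n+2) from rfl]

theorem tri_val (n : Nat) : (triNext (adv triNext (0, 0, 0, 1) n)).1 = triT n := by
  match n with
  | 0 => rfl
  | 1 => rfl
  | n+2 => rw [tri_adv]; rfl

theorem tet_adv (n : Nat) : adv tetNext (0, 0, 0, 0, 1) (n+3) = (3, tetT n, tetT (n+1), tetT (n+2), tetT (n+3)) := by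
  induction n with
  | zero => rfl
  | succ n ih =>
    rw [show n+1+3 = (n+3)+1 from rfl, adv_succ, ih]
    show (3, tetT (n+1), tetT (n+2), tetT (n+3), tetT n + tetT (n+1) + tetT (n+2) + tetT (n+3)) = _
    rw [show tetT (n+4) = tetT n + tetT (n+1) + tetT (n+2) + tetT (n+3) from rfl]

theorem tet_val (n : Nat) : (tetNext (adv tetNext (0, 0, 0, 0, 1) n)).1 = tetT n := by
  match n with
  | 0 => rfl
  | 1 => rfl
  | 2 => rfl
  | n+3 => rw [tet_adv]; rfl

theorem A_loop (pattern : List String) (L : List Int) (res : List Int)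
    (nf np nl nj nt nq : Nat) :
    (L.foldl (mixStepA pattern)
      (res, adv fibNext (0, 1) nf, adv padNext (0, 1, 0, 0) np, adv pelNext (0, 0, 1) nl,
        adv jacNext (0, 0, 1) nj, adv triNext (0, 0, 0, 1) nt, adv tetNext (0, 0, 0, 0, 1) nq)).1
      = res ++ canon pattern L (nf, np, nl, nj, nt, nq) := by
  induction L generalizing res nf np nl nj nt nq with
  | nil => simp [canon]
  | cons i rest ih =>
    rw [List.foldl_cons, mixStepA]
    split_ifs <;>
      (try simp only [fib_val, pad_val, pel_val, jac_val, tri_val, tet_val, ← adv_succ]) <;>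
      rw [ih] <;> simp [canon, *]

theorem step_neg (l : List Int) (k : Nat) (hk : 0 < k) (hlen : k ≤ l.length) :
    (PySem.List.pyGet? l (-(k : Int))).getD 0 = l.getD (l.length - k) 0 := by
  rw [PySem.List.pyGet?_neg_natCast l k hk hlen]
  simp [List.getD, List.getElem?_eq_getElem (by omega : l.length - k < l.length)]

theorem getD_map_rangeT (T : Nat → Int) (j k : Nat) (h : k < j) :
    ((List.range j).map T).getD k 0 = T k := by
  simp [List.getD, h]

theorem tableGo_eq (step : List Int → Int) (T : Nat → Int) (b : Nat)
    (hstep : ∀ j, b ≤ j → step ((List.range j).map T) = T j) :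
    ∀ (fuel j : Nat), b ≤ j → tableGo step ((List.range j).map T) fuel = (List.range (j + fuel)).map T := by
  intro fuel
  induction fuel with
  | zero => intro j _; rfl
  | succ n ih =>
    intro j hj
    rw [tableGo, hstep j hj, show (List.range j).map T ++ [T j] = (List.range (j+1)).map T by
      simp [List.range_succ]]
    rw [ih (j+1) (by omega)]
    have : j + 1 + n = j + (n + 1) := by omega
    rw [this]

theorem table_eq (init : List Int) (step : List Int → Int) (T : Nat → Int) (k : Nat)
    (hinit : init = (List.range init.length).map T)
    (hstep : ∀ j, init.length ≤ j → step ((List.range j).map T) = T j) :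
    table init step k = (List.range k).map T := by
  by_cases h : k ≤ init.length
  · rw [table, show init.take k = (List.range k).map T by
      rw [hinit, ← List.map_take, List.take_range, Nat.min_eq_left h]]
    have : k - ((List.range k).map T).length = 0 := by simp
    rw [this]; rfl
  · rw [table, show init.take k = (List.range init.length).map T by
      rw [List.take_of_length_le (by omega)]; exact hinit]
    have hl : ((List.range init.length).map T).length = init.length := by simp
    rw [hl, tableGo_eq step T init.length hstep _ _ (le_refl _)]
    have : init.length + (k - init.length) = k := by omega
    rw [this]

theorem table_fib (k : Nat) : table [0, 1] stepFib k = (List.range k).map fibT := by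
  apply table_eq
  · rfl
  · intro j hj
    match j, hj with
    | n+2, _ =>
      rw [stepFib]
      simp only [show (-1 : Int) = -((1:Nat):Int) from rfl, show (-2 : Int) = -((2:Nat):Int) from rfl]
      rw [step_neg _ 1 (by omega) (by simp), step_neg _ 2 (by omega) (by simp)]
      simp only [List.length_map, List.length_range]
      rw [show n+2-1 = n+1 from rfl, show n+2-2 = n from rfl,
        getD_map_rangeT _ _ _ (by omega), getD_map_rangeT _ _ _ (by omega),
        show fibT (n+2) = fibT n + fibT (n+1) from rfl]
      ring

theorem table_pad (k : Nat) : table [1, 0, 0] stepPad k = (List.range k).map padT := by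
  apply table_eq
  · rfl
  · intro j hj
    match j, hj with
    | n+3, _ =>
      rw [stepPad]
      simp only [show (-2 : Int) = -((2:Nat):Int) from rfl, show (-3 : Int) = -((3:Nat):Int) from rfl]
      rw [step_neg _ 2 (by omega) (by simp), step_neg _ 3 (by omega) (by simp)]
      simp only [List.length_map, List.length_range]
      rw [show n+3-2 = n+1 from rfl, show n+3-3 = n from rfl,
        getD_map_rangeT _ _ _ (by omega), getD_map_rangeT _ _ _ (by omega),
        show padT (n+3) = padT n + padT (n+1) from rfl]
      ring

theorem table_pel (k : Nat) : table [0, 1] stepPel k = (List.range k).map pelT := by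
  apply table_eq
  · rfl
  · intro j hj
    match j, hj with
    | n+2, _ =>
      rw [stepPel]
      simp only [show (-1 : Int) = -((1:Nat):Int) from rfl, show (-2 : Int) = -((2:Nat):Int) from rfl]
      rw [step_neg _ 1 (by omega) (by simp), step_neg _ 2 (by omega) (by simp)]
      simp only [List.length_map, List.length_range]
      rw [show n+2-1 = n+1 from rfl, show n+2-2 = n from rfl,
        getD_map_rangeT _ _ _ (by omega), getD_map_rangeT _ _ _ (by omega),
        show pelT (n+2) = 2 * pelT (n+1) + pelT n from rfl]

theorem table_jac (k : Nat) : table [0, 1] stepJac k = (List.range k).map jacT := by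
  apply table_eq
  · rfl
  · intro j hj
    match j, hj with
    | n+2, _ =>
      rw [stepJac]
      simp only [show (-1 : Int) = -((1:Nat):Int) from rfl, show (-2 : Int) = -((2:Nat):Int) from rfl]
      rw [step_neg _ 1 (by omega) (by simp), step_neg _ 2 (by omega) (by simp)]
      simp only [List.length_map, List.length_range]
      rw [show n+2-1 = n+1 from rfl, show n+2-2 = n from rfl,
        getD_map_rangeT _ _ _ (by omega), getD_map_rangeT _ _ _ (by omega),
        show jacT (n+2) = 2 * jacT n + jacT (n+1) from rfl]
      ring

theorem table_tri (k : Nat) : table [0, 0, 1] stepTri k = (List.range k).map triT := by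
  apply table_eq
  · rfl
  · intro j hj
    match j, hj with
    | n+3, _ =>
      rw [stepTri]
      simp only [show (-1 : Int) = -((1:Nat):Int) from rfl, show (-2 : Int) = -((2:Nat):Int) from rfl, show (-3 : Int) = -((3:Nat):Int) from rfl]
      rw [step_neg _ 1 (by omega) (by simp), step_neg _ 2 (by omega) (by simp),
        step_neg _ 3 (by omega) (by simp)]
      simp only [List.length_map, List.length_range]
      rw [show n+3-1 = n+2 from rfl, show n+3-2 = n+1 from rfl, show n+3-3 = n from rfl,
        getD_map_rangeT _ _ _ (by omega), getD_map_rangeT _ _ _ (by omega),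
        getD_map_rangeT _ _ _ (by omega),
        show triT (n+3) = triT n + triT (n+1) + triT (n+2) from rfl]
      ring

theorem table_tet (k : Nat) : table [0, 0, 0, 1] stepTet k = (List.range k).map tetT := by
  apply table_eq
  · rfl
  · intro j hj
    match j, hj with
    | n+4, _ =>
      rw [stepTet]
      simp only [show (-1 : Int) = -((1:Nat):Int) from rfl, show (-2 : Int) = -((2:Nat):Int) from rfl, show (-3 : Int) = -((3:Nat):Int) from rfl, show (-4 : Int) = -((4:Nat):Int) from rfl]
      rw [step_neg _ 1 (by omega) (by simp), step_neg _ 2 (by omega) (by simp),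
        step_neg _ 3 (by omega) (by simp), step_neg _ 4 (by omega) (by simp)]
      simp only [List.length_map, List.length_range]
      rw [show n+4-1 = n+3 from rfl, show n+4-2 = n+2 from rfl, show n+4-3 = n+1 from rfl,
        show n+4-4 = n from rfl,
        getD_map_rangeT _ _ _ (by omega), getD_map_rangeT _ _ _ (by omega),
        getD_map_rangeT _ _ _ (by omega), getD_map_rangeT _ _ _ (by omega),
        show tetT (n+4) = tetT n + tetT (n+1) + tetT (n+2) + tetT (n+3) from rfl]
      ring

theorem occ_cons (pattern : List String) (s : String) (i : Int) (rest : List Int) :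
    occ pattern s (i :: rest) = (if pname pattern i == s then 1 else 0) + occ pattern s rest := by
  simp [occ, List.countP_cons]
  split_ifs <;> omega

theorem cnt_loop (pattern : List String) (L : List Int) (cf cp cl cj ct cq : Nat) :
    L.foldl (cntStep pattern) (cf, cp, cl, cj, ct, cq)
      = (cf + occ pattern "fib" L, cp + occ pattern "pad" L, cl + occ pattern "pel" L,
         cj + occ pattern "jac" L, ct + occ pattern "tri" L, cq + occ pattern "tet" L) := by
  induction L generalizing cf cp cl cj ct cq with
  | nil => simp [occ]
  | cons i rest ih =>
    rw [List.foldl_cons, cntStep]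
    split_ifs <;> rw [ih] <;> simp_all [occ_cons, Nat.add_assoc]

theorem get_tab (T : Nat → Int) (k x : Nat) :
    (Option.map T (List.range (k + 1 + x))[k]?).getD 0 = T k := by
  rw [List.getElem?_range (by omega)]; rfl

theorem B_loop (pattern : List String) (L : List Int) (res : List Int)
    (nf np nl nj nt nq : Nat) :
    (L.foldl (mixStepB pattern
        ((List.range (nf + occ pattern "fib" L)).map fibT)
        ((List.range (np + occ pattern "pad" L)).map padT)
        ((List.range (nl + occ pattern "pel" L)).map pelT)
        ((List.range (nj + occ pattern "jac" L)).map jacT)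
        ((List.range (nt + occ pattern "tri" L)).map triT)
        ((List.range (nq + occ pattern "tet" L)).map tetT))
      (res, nf, np, nl, nj, nt, nq)).1
      = res ++ canon pattern L (nf, np, nl, nj, nt, nq) := by
  induction L generalizing res nf np nl nj nt nq with
  | nil => simp [canon, occ]
  | cons i rest ih =>
    rw [List.foldl_cons, mixStepB]
    split_ifs <;> simp_all [occ_cons, canon, get_tab, ← Nat.add_assoc]

-- ===== VERDICT (by name: the statement is the Claim_ definition above) =====
theorem mixbonacci_spec : Claim_equal_mixbonacci := by
  intro pattern length _
  unfold Spec_mixbonacci mixbonacci mixbonacci_alt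
  by_cases h : pattern.length == 0
  · simp [h]
  · simp only [h]
    rw [cnt_loop]
    simp only []
    rw [table_fib, table_pad, table_pel, table_jac, table_tri, table_tet]
    rw [B_loop pattern _ [] 0 0 0 0 0 0]
    exact A_loop pattern _ [] 0 0 0 0 0 0
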